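-- pv_equiv track=rewrite | github.com/payraan/dexchart | fractal_test.py | find_fractals
-- ===== SOURCE A (Python) =====
-- def find_fractals(highs, lows, period=5):
--     """
--     پیدا کردن فرکتال‌های 5 کندلی
--     fractal_high: کندل وسط بالاترین high را دارد
--     fractal_low: کندل وسط پایین‌ترین low را دارد
--     """
--     supply_fractals = []  # برای سطوح عرضه
--     demand_fractals = []  # برای سطوح تقاضا
--
--     half_period = period // 2
--
--     for i in range(half_period, len(highs) - half_period):
--         # بررسی فرکتال عرضه (supply)
--         is_fractal_high = True
--         center_high = highs[i]
--
--         for j in range(i - half_period, i + half_period + 1):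
--             if j != i and highs[j] >= center_high:
--                 is_fractal_high = False
--                 break
--
--         if is_fractal_high:
--             supply_fractals.append(i)
--
--         # بررسی فرکتال تقاضا (demand)
--         is_fractal_low = True
--         center_low = lows[i]
--
--         for j in range(i - half_period, i + half_period + 1):
--             if j != i and lows[j] <= center_low:
--                 is_fractal_low = False
--                 break
--
--         if is_fractal_low:
--             demand_fractals.append(i)
--
--     return supply_fractals, demand_fractals
--
-- highs = [10, 12, 15, 13, 11, 14, 16, 12, 10, 11]
--
-- lows = [8, 9, 11, 10, 9, 11, 12, 9, 8, 9]
-- ===== SOURCE B (Python) =====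
-- # Monotonic-deque sliding-window unique-strict-extremum scan: one O(n) pass per
-- # series instead of A's per-centre window rescan; demand side reuses the max
-- # helper on the negated lows.
-- def _unique_max_centers(vals, n, half):
--     """Centres i in [half, n-half) whose value is the unique strict maximum of
--     vals[i-half .. i+half], found with a monotonic index deque (list + head)."""
--     res = []
--     dq = []      # indices with non-increasing values; dq[head:] is live
--     head = 0
--     for r in range(n):
--         v = vals[r]
--         while len(dq) > head and vals[dq[-1]] < v:
--             dq.pop()
--         dq.append(r)
--         i = r - half
--         if i >= half:
--             left = i - half
--             while dq[head] < left:
--                 head += 1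
--             if dq[head] == i and (head + 1 == len(dq) or vals[dq[head + 1]] < vals[i]):
--                 res.append(i)
--     return res
--
-- def find_fractals(highs, lows, period=5):
--     half = period // 2
--     n = len(highs)
--     supply = _unique_max_centers(highs, n, half)
--     demand = _unique_max_centers([-x for x in lows], n, half)
--     return supply, demand
-- ===== Notes on version B (the rewrite author's own statement) =====
-- stated objective: faster
-- what changed: Replaced A's per-centre window rescan (inner loop over 2*half+1 candidates for every centre, twice) by a single monotonic-deque sliding-window pass per series that keeps the leftmost window maximum plus a multiplicity check, with the demand side obtained by running the same max helper on the negated lows.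
-- outside the precondition, e.g. on find_fractals([1, 2, 1], [0, 5], 3): A returns ([1], []), B raises IndexError; on find_fractals([1, 2, 3], [], 9): A returns ([], []), B raises IndexError
import Mathlib
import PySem

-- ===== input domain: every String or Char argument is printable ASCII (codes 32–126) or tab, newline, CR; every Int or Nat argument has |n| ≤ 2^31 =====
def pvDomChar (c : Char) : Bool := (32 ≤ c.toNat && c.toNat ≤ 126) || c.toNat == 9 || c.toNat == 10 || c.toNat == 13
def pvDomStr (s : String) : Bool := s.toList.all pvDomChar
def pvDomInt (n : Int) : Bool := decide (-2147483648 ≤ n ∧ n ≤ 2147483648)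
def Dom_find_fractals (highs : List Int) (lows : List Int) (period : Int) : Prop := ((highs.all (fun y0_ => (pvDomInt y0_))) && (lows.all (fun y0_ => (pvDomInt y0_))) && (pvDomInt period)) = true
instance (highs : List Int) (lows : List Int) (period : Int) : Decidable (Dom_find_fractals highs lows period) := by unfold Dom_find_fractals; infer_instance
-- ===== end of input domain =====

-- B replaces A's per-centre window rescan by one monotonic-deque sliding-window pass per
-- series (demand side = the same max helper on the negated lows); objective: faster.

-- ===== PORT A =====
-- inner 'for j in range(i-half, i+half+1): if j != i and highs[j] >= center: …; break',
-- ported as structural recursion over the j-range (the break is the early 'false' return);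
-- list indexing is total pyGetD (exact under Pre_, where every accessed index is in range)
def scanHigh (highs : List Int) (i c : Int) : List Int → Bool
  | [] => true
  | j :: rest =>
      if j ≠ i ∧ c ≤ PySem.List.pyGetD highs j 0 then false else scanHigh highs i c rest

def scanLow (lows : List Int) (i c : Int) : List Int → Bool
  | [] => true
  | j :: rest =>
      if j ≠ i ∧ PySem.List.pyGetD lows j 0 ≤ c then false else scanLow lows i c rest

def find_fractals (highs : List Int) (lows : List Int) (period : Int) : List Int × List Int :=
  let half := PySem.Int.floordiv period 2
  (PySem.List.pyRange half ((highs.length : Int) - half) 1).foldl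
    (fun acc i =>
      let acc1 :=
        if scanHigh highs i (PySem.List.pyGetD highs i 0)
            (PySem.List.pyRange (i - half) (i + half + 1) 1)
        then (acc.1 ++ [i], acc.2) else acc
      if scanLow lows i (PySem.List.pyGetD lows i 0)
          (PySem.List.pyRange (i - half) (i + half + 1) 1)
      then (acc1.1, acc1.2 ++ [i]) else acc1)
    ([], [])

-- ===== PORT B =====
-- 'while len(dq) > head and vals[dq[-1]] < v: dq.pop()'
def popSmaller (vals : List Int) (v : Int) (dq : List Int) (head : Nat) : List Int :=
  if h : head < dq.length ∧ PySem.List.pyGetD vals (PySem.List.pyGetD dq (-1) 0) 0 < v then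
    popSmaller vals v dq.dropLast head
  else dq
termination_by dq.length
decreasing_by
  have : 0 < dq.length := Nat.lt_of_le_of_lt (Nat.zero_le _) h.1
  simp [List.length_dropLast]; omega

-- 'while dq[head] < left: head += 1'  (the 'head < dq.length' bound is only a totality
-- guard; in B's runs the live deque is never exhausted while an index is stale)
def skipStale (dq : List Int) (head : Nat) (left : Int) : Nat :=
  if _h : head < dq.length ∧ dq.getD head 0 < left then skipStale dq (head + 1) left else head
termination_by dq.length - head

-- the body of '_unique_max_centers': fold of the 'for r in range(n)' loop,
-- state (res, dq, head) exactly as in Source B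
def uniqLoop (vals : List Int) (half : Int) : List Int → List Int → List Int → Nat → List Int
  | [], res, _, _ => res
  | r :: rest, res, dq, head =>
      let v := PySem.List.pyGetD vals r 0
      let dq1 := popSmaller vals v dq head ++ [r]
      let i := r - half
      if half ≤ i then
        let h2 := skipStale dq1 head (i - half)
        let res1 :=
          if dq1.getD h2 0 = i ∧ (h2 + 1 = dq1.length ∨
              PySem.List.pyGetD vals (dq1.getD (h2 + 1) 0) 0 < PySem.List.pyGetD vals i 0)
          then res ++ [i] else res
        uniqLoop vals half rest res1 dq1 h2
      else uniqLoop vals half rest res dq1 head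

def uniqMaxCenters (vals : List Int) (n half : Int) : List Int :=
  uniqLoop vals half (PySem.List.pyRange 0 n 1) [] [] 0

def find_fractals_alt (highs : List Int) (lows : List Int) (period : Int) : List Int × List Int :=
  let half := PySem.Int.floordiv period 2
  let n : Int := highs.length
  (uniqMaxCenters highs n half, uniqMaxCenters (lows.map (fun x => -x)) n half)

-- ===== PRECONDITION & SPEC =====
-- Pre_ excludes exactly the crash region up to degenerate corners: a negative period makes
-- A's index i run past len(highs) (IndexError always), and lows shorter than highs makes
-- A read lows out of range except in accidental corners (empty scan range, or an early
-- break before the missing index) where A still returns; B raises there too.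
def Pre_find_fractals (highs : List Int) (lows : List Int) (period : Int) : Prop :=
  0 ≤ period ∧ highs.length ≤ lows.length
instance (highs : List Int) (lows : List Int) (period : Int) :
    Decidable (Pre_find_fractals highs lows period) := by unfold Pre_find_fractals; infer_instance

def pvWitness_find_fractals : List Int × List Int × Int :=
  ([10, 12, 15, 13, 11, 14, 16, 12, 10, 11], ([8, 9, 11, 10, 9, 11, 12, 9, 8, 9], 5))

def Spec_find_fractals (highs : List Int) (lows : List Int) (period : Int)
    (out : List Int × List Int) : Prop := out = find_fractals_alt highs lows period
instance (highs : List Int) (lows : List Int) (period : Int) (out : List Int × List Int) :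
    Decidable (Spec_find_fractals highs lows period out) := by
  unfold Spec_find_fractals; infer_instance

-- ===== CLAIM (what is proved, stated in full; the proofs are below) =====
def Claim_equal_find_fractals : Prop := ∀ (highs : List Int) (lows : List Int) (period : Int), Dom_find_fractals highs lows period → Pre_find_fractals highs lows period → Spec_find_fractals highs lows period (find_fractals highs lows period)

-- ===== LEMMAS AND PROOFS =====

-- abbreviation used throughout the proofs: the (totalised) value read at index j
-- 'j survives against all later candidates up to r': vals[k] ≤ vals[j] for every k in (j, r]
def keepB (vals : List Int) (r j : Int) : Bool :=
  (PySem.List.pyRange (j + 1) (r + 1) 1).all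
    (fun k => decide (PySem.List.pyGetD vals k 0 ≤ PySem.List.pyGetD vals j 0))

-- 'i is the unique strict maximum of its window [i-half, i+half]'
def pwinB (vals : List Int) (half i : Int) : Bool :=
  (PySem.List.pyRange (i - half) (i + half + 1) 1).all
    (fun j => decide (j = i ∨ PySem.List.pyGetD vals j 0 < PySem.List.pyGetD vals i 0))

-- the live deque contents after step r
def activeL (vals : List Int) (half r : Int) : List Int :=
  (PySem.List.pyRange (max 0 (r - 2 * half)) (r + 1) 1).filter (keepB vals r)

lemma keepB_iff (vals : List Int) (r j : Int) :
    keepB vals r j = true ↔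
      ∀ k : Int, j < k → k ≤ r → PySem.List.pyGetD vals k 0 ≤ PySem.List.pyGetD vals j 0 := by
  simp only [keepB, List.all_eq_true, PySem.List.mem_pyRange_one, decide_eq_true_eq]
  constructor
  · intro h k h1 h2; exact h k ⟨by omega, by omega⟩
  · intro h k hk; exact h k (by omega) (by omega)

lemma pwinB_iff (vals : List Int) (half i : Int) :
    pwinB vals half i = true ↔
      ∀ j : Int, i - half ≤ j → j < i + half + 1 → j ≠ i →
        PySem.List.pyGetD vals j 0 < PySem.List.pyGetD vals i 0 := by
  simp only [pwinB, List.all_eq_true, PySem.List.mem_pyRange_one, decide_eq_true_eq]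
  constructor
  · intro h j h1 h2 h3
    rcases h j ⟨h1, h2⟩ with h | h
    · exact absurd h h3
    · exact h
  · intro h j hj
    by_cases hji : j = i
    · exact Or.inl hji
    · exact Or.inr (h j hj.1 hj.2 hji)

lemma scanHigh_eq (highs : List Int) (i c : Int) (js : List Int) :
    scanHigh highs i c js =
      js.all (fun j => decide (j = i ∨ PySem.List.pyGetD highs j 0 < c)) := by
  induction js with
  | nil => rfl
  | cons j rest ih =>
    simp only [scanHigh, List.all_cons, ih]
    by_cases h1 : j = i
    · simp [h1]
    · by_cases h2 : PySem.List.pyGetD highs j 0 < c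
      · have hnot : ¬ (j ≠ i ∧ c ≤ PySem.List.pyGetD highs j 0) := by rintro ⟨_, hc⟩; omega
        simp [hnot, h2]
      · have hyes : (j ≠ i ∧ c ≤ PySem.List.pyGetD highs j 0) := ⟨h1, by omega⟩
        simp [hyes, h2]

lemma scanLow_eq (lows : List Int) (i c : Int) (js : List Int) :
    scanLow lows i c js =
      js.all (fun j => decide (j = i ∨ c < PySem.List.pyGetD lows j 0)) := by
  induction js with
  | nil => rfl
  | cons j rest ih =>
    simp only [scanLow, List.all_cons, ih]
    by_cases h1 : j = i
    · simp [h1]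
    · by_cases h2 : c < PySem.List.pyGetD lows j 0
      · have hnot : ¬ (j ≠ i ∧ PySem.List.pyGetD lows j 0 ≤ c) := by rintro ⟨_, hc⟩; omega
        simp [hnot, h2]
      · have hyes : (j ≠ i ∧ PySem.List.pyGetD lows j 0 ≤ c) := ⟨h1, by omega⟩
        simp [hyes, h2]

-- A's outer loop: appending to the two accumulator lists is filtering the i-range
lemma foldl_pair (l : List Int) (pH pL : Int → Bool) :
    ∀ s d : List Int,
      l.foldl (fun acc i =>
        let acc1 := if pH i then (acc.1 ++ [i], acc.2) else acc
        if pL i then (acc1.1, acc1.2 ++ [i]) else acc1) (s, d)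
      = (s ++ l.filter pH, d ++ l.filter pL) := by
  induction l with
  | nil => simp
  | cons x t ih =>
    intro s d
    simp only [List.foldl_cons, List.filter_cons]
    by_cases hx : pH x <;> by_cases hy : pL x <;> simp [hx, hy, ih]

lemma getD_append_len (pre : List Int) (a : Int) (t : List Int) (d : Int) :
    (pre ++ a :: t).getD pre.length d = a := by
  simp [List.getD_eq_getElem?_getD]

lemma getD_append_right (pre m : List Int) (k : Nat) (d : Int) :
    (pre ++ m).getD (pre.length + k) d = m.getD k d := by
  simp [List.getD_eq_getElem?_getD,
    List.getElem?_append_right (Nat.le_add_right pre.length k)]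

-- the back-popping while loop, on a deque whose live part has non-increasing values
lemma popSmaller_spec (vals : List Int) (v : Int) :
    ∀ (l pre : List Int),
      l.Pairwise (fun a b => PySem.List.pyGetD vals b 0 ≤ PySem.List.pyGetD vals a 0) →
      popSmaller vals v (pre ++ l) pre.length
        = pre ++ l.filter (fun j => decide (v ≤ PySem.List.pyGetD vals j 0)) := by
  intro l
  induction l using List.reverseRecOn with
  | nil =>
    intro pre _
    rw [popSmaller]
    simp
  | append_singleton l0 a ih =>
    intro pre hp
    have hp0 : l0.Pairwise (fun a b => PySem.List.pyGetD vals b 0 ≤ PySem.List.pyGetD vals a 0) :=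
      (List.pairwise_append.mp hp).1
    have hlast : PySem.List.pyGetD (pre ++ (l0 ++ [a])) (-1) 0 = a := by
      rw [← List.append_assoc]
      exact PySem.List.pyGetD_neg_one_append_singleton _ _ _
    rw [popSmaller]
    by_cases hv : PySem.List.pyGetD vals a 0 < v
    · have hcond : pre.length < (pre ++ (l0 ++ [a])).length ∧
          PySem.List.pyGetD vals (PySem.List.pyGetD (pre ++ (l0 ++ [a])) (-1) 0) 0 < v := by
        refine ⟨by simp, by rw [hlast]; exact hv⟩
      rw [dif_pos hcond]
      have hdrop : (pre ++ (l0 ++ [a])).dropLast = pre ++ l0 := by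
        rw [← List.append_assoc]; exact List.dropLast_concat
      rw [hdrop, ih pre hp0]
      have : List.filter (fun j => decide (v ≤ PySem.List.pyGetD vals j 0)) (l0 ++ [a])
          = List.filter (fun j => decide (v ≤ PySem.List.pyGetD vals j 0)) l0 := by
        rw [List.filter_append]
        simp [Int.not_le.mpr hv]
      rw [this]
    · have hcond : ¬ (pre.length < (pre ++ (l0 ++ [a])).length ∧
          PySem.List.pyGetD vals (PySem.List.pyGetD (pre ++ (l0 ++ [a])) (-1) 0) 0 < v) := by
        rintro ⟨_, hlt⟩
        rw [hlast] at hlt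
        exact hv hlt
      rw [dif_neg hcond]
      have : List.filter (fun j => decide (v ≤ PySem.List.pyGetD vals j 0)) (l0 ++ [a])
          = l0 ++ [a] := by
        rw [List.filter_eq_self]
        intro b hb
        rcases List.mem_append.mp hb with hb | hb
        · have := (List.pairwise_append.mp hp).2.2 b hb a (List.mem_singleton_self a)
          simp only [decide_eq_true_eq]
          omega
        · simp only [List.mem_singleton] at hb
          subst hb
          simp only [decide_eq_true_eq]
          omega
      rw [this]

-- the head-advancing while loop skips exactly the stale prefix of the live part
lemma skipStale_spec (left : Int) :
    ∀ (m pre : List Int),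
      skipStale (pre ++ m) pre.length left
        = pre.length + (m.takeWhile (fun j => decide (j < left))).length := by
  intro m
  induction m with
  | nil =>
    intro pre
    rw [skipStale]
    simp
  | cons a t ih =>
    intro pre
    rw [skipStale]
    by_cases h : a < left
    · have hcond : pre.length < (pre ++ a :: t).length ∧ (pre ++ a :: t).getD pre.length 0 < left := by
        refine ⟨by simp, ?_⟩
        rw [getD_append_len]; exact h
      rw [dif_pos hcond]
      have h1 : pre ++ a :: t = (pre ++ [a]) ++ t := by simp
      have h2 : pre.length + 1 = (pre ++ [a]).length := by simp
      rw [h1, h2, ih (pre ++ [a])]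
      simp [h]
      omega
    · have hcond : ¬ (pre.length < (pre ++ a :: t).length ∧ (pre ++ a :: t).getD pre.length 0 < left) := by
        rintro ⟨_, hlt⟩
        rw [getD_append_len] at hlt
        exact h hlt
      rw [dif_neg hcond]
      simp [h]

lemma dropWhile_lt_eq_filter (c : Int) :
    ∀ (l : List Int), l.Pairwise (· < ·) →
      l.dropWhile (fun j => decide (j < c)) = l.filter (fun j => decide (c ≤ j)) := by
  intro l
  induction l with
  | nil => intro _; rfl
  | cons a t ih =>
    intro hp
    rcases List.pairwise_cons.mp hp with ⟨ha, ht⟩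
    by_cases h : a < c
    · simp only [List.dropWhile_cons, List.filter_cons, h, decide_true]
      have : ¬ (c ≤ a) := by omega
      simp [this, ih ht]
    · simp only [List.dropWhile_cons, List.filter_cons]
      have hca : c ≤ a := by omega
      simp only [h, decide_false, Bool.false_eq_true, if_false, hca, decide_true, if_true]
      have : List.filter (fun j => decide (c ≤ j)) t = t := by
        rw [List.filter_eq_self]
        intro b hb
        have := ha b hb
        simp only [decide_eq_true_eq]
        omega
      rw [this]

lemma mem_activeL (vals : List Int) (half r j : Int) :
    j ∈ activeL vals half r ↔
      (max 0 (r - 2 * half) ≤ j ∧ j < r + 1) ∧ keepB vals r j = true := by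
  simp [activeL, List.mem_filter, PySem.List.mem_pyRange_one]

lemma activeL_pairwise (vals : List Int) (half r : Int) :
    (activeL vals half r).Pairwise (· < ·) :=
  List.Pairwise.filter _ (PySem.List.pairwise_lt_pyRange_one _ _)

lemma activeL_noninc (vals : List Int) (half r : Int) :
    (activeL vals half r).Pairwise
      (fun a b => PySem.List.pyGetD vals b 0 ≤ PySem.List.pyGetD vals a 0) := by
  refine List.Pairwise.imp_of_mem ?_ (activeL_pairwise vals half r)
  intro a b ha hb hab
  have hka := ((mem_activeL vals half r a).mp ha).2
  have hbr := ((mem_activeL vals half r b).mp hb).1.2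
  exact (keepB_iff vals r a).mp hka b hab (by omega)

-- one arrival: pop-then-append turns the previous live deque into the unrestricted
-- live deque for step r
lemma active_step (vals : List Int) (half r : Int) (hr : 0 ≤ r) (hh : 0 ≤ half) :
    (activeL vals half (r - 1)).filter
        (fun j => decide (PySem.List.pyGetD vals r 0 ≤ PySem.List.pyGetD vals j 0)) ++ [r]
      = (PySem.List.pyRange (max 0 (r - 1 - 2 * half)) (r + 1) 1).filter (keepB vals r) := by
  have hlb : max 0 (r - 1 - 2 * half) ≤ r := by omega
  have hsplit : PySem.List.pyRange (max 0 (r - 1 - 2 * half)) (r + 1) 1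
      = PySem.List.pyRange (max 0 (r - 1 - 2 * half)) r 1 ++ [r] := by
    exact PySem.List.pyRange_one_succ_right hlb
  rw [hsplit, List.filter_append]
  have hkr : keepB vals r r = true := by
    simp [keepB, PySem.List.pyRange_one_eq_nil (by omega : r + 1 ≤ r + 1)]
  have h1 : List.filter (keepB vals r) [r] = [r] := by simp [hkr]
  rw [h1]
  have h2 : max 0 (r - 1 - 2 * half) = max 0 ((r - 1) - 2 * half) := by ring_nf
  unfold activeL
  rw [List.filter_filter]
  have h3 : (r - 1) + 1 = r := by ring
  rw [h3]
  congr 1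
  apply List.filter_congr
  intro j hj
  have hjr : j < r := (PySem.List.mem_pyRange_one.mp hj).2
  have hkeq : keepB vals r j
      = (decide (PySem.List.pyGetD vals r 0 ≤ PySem.List.pyGetD vals j 0) && keepB vals (r - 1) j) := by
    by_cases hk : keepB vals r j = true
    · have hprop := (keepB_iff vals r j).mp hk
      have ha : PySem.List.pyGetD vals r 0 ≤ PySem.List.pyGetD vals j 0 := hprop r hjr (le_refl r)
      have hb : keepB vals (r - 1) j = true := by
        rw [keepB_iff]
        intro k h1k h2k
        exact hprop k h1k (by omega)
      rw [hk, hb]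
      simp [ha]
    · rw [Bool.eq_false_iff.mpr hk]
      by_cases ha : PySem.List.pyGetD vals r 0 ≤ PySem.List.pyGetD vals j 0
      · have hb : keepB vals (r - 1) j = false := by
          by_contra hbb
          have hb' := (keepB_iff vals (r - 1) j).mp (Bool.of_not_eq_false hbb)
          apply hk
          rw [keepB_iff]
          intro k h1k h2k
          by_cases hkr' : k = r
          · subst hkr'; exact ha
          · exact hb' k h1k (by omega)
        simp [hb]
      · simp [ha]
  rw [hkeq]

-- restricting a filtered range from the left
lemma filter_range_ge (a c b : Int) (p : Int → Bool) (h1 : a ≤ c) :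
    (PySem.List.pyRange a b 1).filter (fun j => decide (c ≤ j) && p j)
      = (PySem.List.pyRange c b 1).filter p := by
  by_cases hb : c ≤ b
  · rw [PySem.List.pyRange_one_append a c b h1 hb, List.filter_append]
    have hnil : (PySem.List.pyRange a c 1).filter (fun j => decide (c ≤ j) && p j) = [] := by
      rw [List.filter_eq_nil_iff]
      intro j hj
      have := (PySem.List.mem_pyRange_one.mp hj).2
      simp only [Bool.and_eq_true, decide_eq_true_eq, not_and]
      intro hc
      omega
    rw [hnil, List.nil_append]
    apply List.filter_congr
    intro j hj
    have := (PySem.List.mem_pyRange_one.mp hj).1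
    simp [this]
  · have h2 : PySem.List.pyRange c b 1 = [] := PySem.List.pyRange_one_eq_nil (by omega)
    rw [h2, List.filter_nil]
    rw [List.filter_eq_nil_iff]
    intro j hj
    have := (PySem.List.mem_pyRange_one.mp hj).2
    simp only [Bool.and_eq_true, decide_eq_true_eq, not_and]
    intro hc
    omega

lemma mem_ge_head (a : Int) (t : List Int) (hp : (a :: t).Pairwise (· < ·)) :
    ∀ y ∈ a :: t, a ≤ y := by
  intro y hy
  rcases List.mem_cons.mp hy with h | h
  · omega
  · have := (List.pairwise_cons.mp hp).1 y h
    omega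

lemma second_le (a b : Int) (t : List Int) (hp : (a :: b :: t).Pairwise (· < ·)) :
    ∀ y ∈ a :: b :: t, y ≠ a → b ≤ y := by
  intro y hy hne
  rcases List.mem_cons.mp hy with h | h
  · exact absurd h hne
  · exact mem_ge_head b t (List.pairwise_cons.mp hp).2 y h

-- the deque-front test at centre i decides exactly 'unique strict window maximum'
lemma center_cond (vals : List Int) (half i : Int) (hh : 0 ≤ half) :
    ((((PySem.List.pyRange (i - half) (i + half + 1) 1).filter (keepB vals (i + half))).getD 0 0 = i ∧
      (((PySem.List.pyRange (i - half) (i + half + 1) 1).filter (keepB vals (i + half))).length = 1 ∨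
        PySem.List.pyGetD vals
          (((PySem.List.pyRange (i - half) (i + half + 1) 1).filter (keepB vals (i + half))).getD 1 0) 0
          < PySem.List.pyGetD vals i 0))
      ↔ pwinB vals half i = true) := by
  set r := i + half with hrdef
  set m := (PySem.List.pyRange (i - half) (i + half + 1) 1).filter (keepB vals r) with hmdef
  have hmem : ∀ j : Int, j ∈ m ↔ (i - half ≤ j ∧ j < i + half + 1) ∧ keepB vals r j = true := by
    intro j; simp [hmdef, List.mem_filter, PySem.List.mem_pyRange_one]
  have hpw : m.Pairwise (· < ·) :=
    List.Pairwise.filter _ (PySem.List.pairwise_lt_pyRange_one _ _)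
  have hrm : r ∈ m := by
    rw [hmem]
    refine ⟨⟨by omega, by omega⟩, ?_⟩
    simp [keepB, PySem.List.pyRange_one_eq_nil (by omega : r + 1 ≤ r + 1)]
  rw [pwinB_iff]
  constructor
  · -- code condition → unique strict maximum
    rintro ⟨hhead, hsecond⟩
    rcases hm : m with _ | ⟨a, t⟩
    · rw [hm] at hrm; exact absurd hrm (List.not_mem_nil)
    have ha : a = i := by rw [hm] at hhead; simpa using hhead
    subst ha
    rw [hm] at hrm hpw hmem hsecond
    have him : a ∈ a :: t := List.mem_cons_self
    have hki := ((hmem a).mp him).2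
    have hkiP := (keepB_iff vals r a).mp hki
    -- every later window index is ≤ the centre; strictly, via the second element
    have hgt : ∀ k : Int, a < k → k ≤ r →
        PySem.List.pyGetD vals k 0 < PySem.List.pyGetD vals a 0 := by
      intro k hk1 hk2
      have hle := hkiP k hk1 hk2
      by_contra hno
      have heq : PySem.List.pyGetD vals k 0 = PySem.List.pyGetD vals a 0 := by omega
      -- k survives too, so it is in m and the second element refutes the code condition
      have hkm : k ∈ a :: t := by
        rw [hmem]
        refine ⟨⟨by omega, by omega⟩, ?_⟩
        rw [keepB_iff]
        intro k2 h1 h2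
        have := hkiP k2 (by omega) h2
        omega
      rcases ht : t with _ | ⟨b, t2⟩
      · rw [ht] at hkm
        simp only [List.mem_cons] at hkm
        rcases hkm with h | h
        · omega
        · simp at h
      rw [ht] at hkm hpw hmem hsecond
      rcases hsecond with hlen | hblt
      · simp at hlen
      have hb2 : (a :: b :: t2).getD 1 0 = b := rfl
      rw [hb2] at hblt
      have hbm : b ∈ a :: b :: t2 := by simp
      have hkb := ((hmem b).mp hbm).2
      have hbk : b ≤ k := second_le a b t2 hpw k hkm (by omega)
      have hab : a < b := (List.pairwise_cons.mp hpw).1 b (by simp)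
      by_cases hbeq : b = k
      · subst hbeq; omega
      · have := (keepB_iff vals r b).mp hkb k (by omega) hk2
        omega
    -- earlier window indices, by downward induction on the distance to the centre
    have hlt : ∀ d : Nat, ∀ j : Int, a - half ≤ j → j < a → (a - j).toNat = d →
        PySem.List.pyGetD vals j 0 < PySem.List.pyGetD vals a 0 := by
      intro d
      induction d using Nat.strong_induction_on with
      | _ d ih =>
        intro j hj1 hj2 hd
        have hjm : j ∉ a :: t := by
          intro hjmem
          have := mem_ge_head a t hpw j hjmem
          omega
        have hknot : keepB vals r j = false := by
          by_contra hkk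
          exact hjm ((hmem j).mpr ⟨⟨by omega, by omega⟩, Bool.of_not_eq_false hkk⟩)
        have : ¬ (∀ k : Int, j < k → k ≤ r →
            PySem.List.pyGetD vals k 0 ≤ PySem.List.pyGetD vals j 0) := by
          intro hall
          rw [← keepB_iff vals r j] at hall
          rw [hknot] at hall
          exact Bool.false_ne_true hall
        push Not at this
        rcases this with ⟨k, hk1, hk2, hk3⟩
        by_cases hki' : k = a
        · subst hki'; omega
        · by_cases hka : a < k
          · have := hgt k hka hk2
            omega
          · have hkl : k < a := by omega
            have := ih (a - k).toNat (by omega) k (by omega) hkl rfl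
            omega
    intro j hj1 hj2 hj3
    by_cases hja : a < j
    · exact hgt j hja (by omega)
    · exact hlt (a - j).toNat j hj1 (by omega) rfl
  · -- unique strict maximum → code condition
    intro hP
    have hki : keepB vals r i = true := by
      rw [keepB_iff]
      intro k h1 h2
      have := hP k (by omega) (by omega) (by omega)
      omega
    have him : i ∈ m := (hmem i).mpr ⟨⟨by omega, by omega⟩, hki⟩
    have hmin : ∀ j ∈ m, i ≤ j := by
      intro j hjm
      by_contra hno
      have hj := (hmem j).mp hjm
      have hkj := (keepB_iff vals r j).mp hj.2 i (by omega) (by omega)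
      have := hP j hj.1.1 hj.1.2 (by omega)
      omega
    rcases hm : m with _ | ⟨a, t⟩
    · rw [hm] at him; exact absurd him (List.not_mem_nil)
    rw [hm] at him hpw hmin
    have ha : a = i := by
      have h1 := hmin a List.mem_cons_self
      rcases List.mem_cons.mp him with h | h
      · omega
      · have := (List.pairwise_cons.mp hpw).1 i h
        omega
    subst ha
    refine ⟨by simp, ?_⟩
    rcases ht : t with _ | ⟨b, t2⟩
    · left; simp
    right
    rw [ht] at hm hpw
    have hb2 : (a :: b :: t2).getD 1 0 = b := rfl
    rw [hb2]
    have hbm : b ∈ m := by rw [hm]; simp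
    have hb := (hmem b).mp hbm
    have hab : a < b := (List.pairwise_cons.mp hpw).1 b (by simp)
    exact hP b hb.1.1 hb.1.2 (by omega)

-- the main loop invariant: from any state whose live part is activeL (r0-1),
-- the loop appends exactly the qualifying centres of the remaining steps
lemma uniqLoop_spec (vals : List Int) (half : Int) (hh : 0 ≤ half) (n : Int) :
    ∀ (fuel : Nat) (r0 : Int), (n - r0).toNat = fuel → 0 ≤ r0 →
    ∀ (res pre : List Int),
      uniqLoop vals half (PySem.List.pyRange r0 n 1) res
          (pre ++ activeL vals half (r0 - 1)) pre.length
        = res ++ ((PySem.List.pyRange r0 n 1).filter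
            (fun r => decide (half ≤ r - half) && pwinB vals half (r - half))).map
            (fun r => r - half) := by
  intro fuel
  induction fuel with
  | zero =>
    intro r0 hfuel hr0 res pre
    have hn : n ≤ r0 := by omega
    rw [PySem.List.pyRange_one_eq_nil hn]
    simp [uniqLoop]
  | succ fuel ih =>
    intro r0 hfuel hr0 res pre
    by_cases hlt : r0 < n
    swap
    · rw [PySem.List.pyRange_one_eq_nil (by omega)]
      simp [uniqLoop]
    rw [PySem.List.pyRange_one_cons hlt]
    simp only [uniqLoop]
    rw [popSmaller_spec vals _ _ pre (activeL_noninc vals half (r0 - 1))]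
    rw [List.append_assoc]
    rw [active_step vals half r0 hr0 hh]
    set Mpre := (PySem.List.pyRange (max 0 (r0 - 1 - 2 * half)) (r0 + 1) 1).filter (keepB vals r0) with hMpre
    have hMpw : Mpre.Pairwise (· < ·) :=
      List.Pairwise.filter _ (PySem.List.pairwise_lt_pyRange_one _ _)
    by_cases hc : half ≤ r0 - half
    · rw [if_pos hc]
      set left := r0 - half - half with hleft
      -- the live deque after the stale skip
      have hsk : skipStale (pre ++ Mpre) pre.length left
          = pre.length + (Mpre.takeWhile (fun j => decide (j < left))).length :=
        skipStale_spec left Mpre pre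
      have hsplitM : pre ++ Mpre
          = (pre ++ Mpre.takeWhile (fun j => decide (j < left)))
            ++ Mpre.dropWhile (fun j => decide (j < left)) := by
        rw [List.append_assoc, List.takeWhile_append_dropWhile]
      have hdw : Mpre.dropWhile (fun j => decide (j < left)) = activeL vals half r0 := by
        rw [dropWhile_lt_eq_filter left Mpre hMpw, hMpre, List.filter_filter]
        have hmax : max 0 (r0 - 2 * half) = left := by omega
        rw [activeL, hmax]
        exact filter_range_ge (max 0 (r0 - 1 - 2 * half)) left (r0 + 1) (keepB vals r0) (by omega)
      have hlen2 : pre.length + (Mpre.takeWhile (fun j => decide (j < left))).length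
          = (pre ++ Mpre.takeWhile (fun j => decide (j < left))).length := by simp
      set pre2 := pre ++ Mpre.takeWhile (fun j => decide (j < left)) with hpre2
      set m2 := activeL vals half r0 with hm2
      have hactive_eq : (PySem.List.pyRange (r0 - half - half) (r0 + 1) 1).filter (keepB vals r0) = m2 := by
        rw [hm2, activeL]
        have hmax : max 0 (r0 - 2 * half) = r0 - half - half := by omega
        rw [hmax]
      have hwin_eq : (PySem.List.pyRange ((r0 - half) - half) ((r0 - half) + half + 1) 1).filter
            (keepB vals ((r0 - half) + half)) = m2 := by
        have e1 : (r0 - half) + half + 1 = r0 + 1 := by ring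
        have e2 : (r0 - half) + half = r0 := by ring
        rw [e1, e2]
        exact hactive_eq
      have hdq : pre ++ Mpre = pre2 ++ m2 := by rw [hsplitM, hdw]
      rw [hsk, hlen2, hdq]
      -- the per-centre condition in terms of m2
      have hg0 : (pre2 ++ m2).getD pre2.length 0 = m2.getD 0 0 := by
        have := getD_append_right pre2 m2 0 0
        simpa using this
      have hg1 : (pre2 ++ m2).getD (pre2.length + 1) 0 = m2.getD 1 0 :=
        getD_append_right pre2 m2 1 0
      have hm2ne : m2 ≠ [] := by
        rw [hm2]
        intro hnil
        have : r0 ∈ activeL vals half r0 := by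
          rw [mem_activeL]
          refine ⟨⟨by omega, by omega⟩, ?_⟩
          simp [keepB, PySem.List.pyRange_one_eq_nil (by omega : r0 + 1 ≤ r0 + 1)]
        rw [hnil] at this
        exact absurd this (List.not_mem_nil)
      have hlen_iff : (pre2.length + 1 = (pre2 ++ m2).length) ↔ m2.length = 1 := by
        simp only [List.length_append]
        omega
      have hcond_iff :
          ((pre2 ++ m2).getD pre2.length 0 = r0 - half ∧
            (pre2.length + 1 = (pre2 ++ m2).length ∨
              PySem.List.pyGetD vals ((pre2 ++ m2).getD (pre2.length + 1) 0) 0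
                < PySem.List.pyGetD vals (r0 - half) 0))
          ↔ pwinB vals half (r0 - half) = true := by
        rw [hg0, hg1, hlen_iff]
        have := center_cond vals half (r0 - half) hh
        rw [hwin_eq] at this
        exact this
      -- fold the recursive call
      have hrec := ih (r0 + 1) (by omega) (by omega)
      have hr0e : r0 + 1 - 1 = r0 := by ring
      rw [hr0e] at hrec
      by_cases hq : pwinB vals half (r0 - half) = true
      · rw [if_pos (hcond_iff.mpr hq)]
        rw [hrec (res ++ [r0 - half]) pre2]
        rw [List.filter_cons]
        simp only [hq, hc, decide_true, Bool.and_self, if_true]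
        simp [List.append_assoc]
      · rw [if_neg (fun hcnd => hq (hcond_iff.mp hcnd))]
        rw [hrec res pre2]
        rw [List.filter_cons]
        have hqf : pwinB vals half (r0 - half) = false := by
          revert hq; cases pwinB vals half (r0 - half) <;> simp
        have : (decide (half ≤ r0 - half) && pwinB vals half (r0 - half)) = false := by
          simp [hqf]
        simp only [this, Bool.false_eq_true, if_false]
    · rw [if_neg hc]
      have hMeq : Mpre = activeL vals half r0 := by
        rw [hMpre, activeL]
        have h1 : max 0 (r0 - 1 - 2 * half) = 0 := by omega
        have h2 : max 0 (r0 - 2 * half) = 0 := by omega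
        rw [h1, h2]
      rw [hMeq]
      have hrec := ih (r0 + 1) (by omega) (by omega)
      have hr0e : r0 + 1 - 1 = r0 := by ring
      rw [hr0e] at hrec
      rw [hrec res pre]
      rw [List.filter_cons]
      have : (decide (half ≤ r0 - half) && pwinB vals half (r0 - half)) = false := by
        simp [hc]
      simp only [this, Bool.false_eq_true, if_false]

lemma map_filter_shift (half : Int) (q : Int → Bool) :
    ∀ l : List Int,
      (l.filter (fun r => q (r - half))).map (fun r => r - half)
        = (l.map (fun r => r - half)).filter q := by
  intro l
  induction l with
  | nil => rfl
  | cons x t ih =>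
    simp only [List.filter_cons, List.map_cons]
    by_cases hx : q (x - half)
    · simp [hx, ih]
    · simp [hx, ih]

lemma map_shift_pyRange (half n : Int) :
    (PySem.List.pyRange 0 n 1).map (fun r => r - half)
      = PySem.List.pyRange (-half) (n - half) 1 := by
  rw [PySem.List.pyRange_one 0 n, PySem.List.pyRange_one (-half) (n - half)]
  rw [List.map_map]
  have he : n - half - -half = n - 0 := by ring
  rw [he]
  apply List.map_congr_left
  intro k _
  simp
  ring

lemma uniqMaxCenters_eq (vals : List Int) (n half : Int) (hh : 0 ≤ half) :
    uniqMaxCenters vals n half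
      = (PySem.List.pyRange half (n - half) 1).filter (pwinB vals half) := by
  unfold uniqMaxCenters
  have hinit : activeL vals half (0 - 1) = [] := by
    unfold activeL
    have h1 : max 0 (0 - 1 - 2 * half) = 0 := max_eq_left (by omega)
    rw [h1]
    rw [PySem.List.pyRange_one_eq_nil (by omega : (0:Int) - 1 + 1 ≤ 0)]
    rfl
  have h0 := uniqLoop_spec vals half hh n (n - 0).toNat 0 rfl (le_refl 0) [] []
  rw [hinit] at h0
  simp only [List.append_nil, List.nil_append, List.length_nil] at h0
  rw [h0]
  rw [map_filter_shift half (fun i => decide (half ≤ i) && pwinB vals half i)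
      (PySem.List.pyRange 0 n 1)]
  rw [map_shift_pyRange half n]
  exact filter_range_ge (-half) half (n - half) (pwinB vals half) (by omega)

lemma all_congr' {l : List Int} {p q : Int → Bool} (h : ∀ x ∈ l, p x = q x) :
    l.all p = l.all q := by
  induction l with
  | nil => rfl
  | cons x t ih =>
    simp only [List.all_cons]
    rw [h x List.mem_cons_self, ih (fun y hy => h y (List.mem_cons_of_mem x hy))]

-- ===== VERDICT (by name: the statement is the Claim_ definition above) =====
theorem find_fractals_spec : Claim_equal_find_fractals := by
  intro highs lows period _hdom hpre
  rcases hpre with ⟨hp, _hlen⟩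
  unfold Spec_find_fractals find_fractals find_fractals_alt
  have hh : 0 ≤ PySem.Int.floordiv period 2 := by
    rw [PySem.Int.floordiv_eq_ediv_of_pos (by omega : (0:Int) < 2)]
    exact Int.ediv_nonneg hp (by omega)
  set half := PySem.Int.floordiv period 2 with hhalf
  rw [foldl_pair]
  simp only [List.nil_append]
  rw [uniqMaxCenters_eq highs (highs.length : Int) half hh,
    uniqMaxCenters_eq (lows.map (fun x => -x)) (highs.length : Int) half hh]
  have hmap : ∀ k : Int, PySem.List.pyGetD (lows.map (fun x => -x)) k 0
      = - PySem.List.pyGetD lows k 0 := by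
    intro k
    have := PySem.List.pyGetD_map (fun x : Int => -x) lows k 0
    simpa using this
  refine congrArg₂ Prod.mk ?_ ?_
  · apply List.filter_congr
    intro i _
    rw [scanHigh_eq]
    rfl
  · apply List.filter_congr
    intro i _
    rw [scanLow_eq]
    simp only [pwinB]
    apply all_congr'
    intro j _
    apply decide_eq_decide.mpr
    rw [hmap j, hmap i]
    omega
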